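-- pv_equiv track=rewrite | github.com/alexandraback/datacollection | solutions_5634697451274240_1/Python/Skywalker8921/B.py | find_last_minus
-- ===== SOURCE A (Python) =====
-- def find_last_minus(s,l):
--     i = j = None
--     cur = None
--     n = -1
--     for c in s:
--         n += 1
--         if cur and c == cur:
--             pass
--         elif c == '-':
--             i = n
--         elif cur == '-':
--             j = n
--         cur = c
--     if (i is not None) and (j is None):
--         j = l
--     return (i,j)
-- ===== SOURCE B (Python) =====
-- def find_last_minus(s, l):
--     # Collect all maximal dash runs as (start, end) pairs, then read the
--     # answer off the run list: i = start of last run; j = end of the last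
--     # run followed by a non-dash char (only the final run can touch the
--     # string end), defaulting to l when no run is followed by anything.
--     runs = []
--     k = 0
--     n = len(s)
--     while k < n:
--         if s[k] != '-':
--             k += 1
--         else:
--             e = k + 1
--             while e < n and s[e] == '-':
--                 e += 1
--             runs.append((k, e))
--             k = e
--     if not runs:
--         return (None, None)
--     i, e = runs[-1]
--     if e < n:
--         j = e
--     elif len(runs) >= 2:
--         j = runs[-2][1]
--     else:
--         j = l
--     return (i, j)
-- ===== Notes on version B (the rewrite author's own statement) =====
-- stated objective: alternative
-- what changed: B replaces A's one-pass state machine (i/j/cur trackers updated per character) by first extracting the list of maximal dash runs with an index scan and then reading i and j off the run list (last run's start; end of last run not touching the string end, else l).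
import Mathlib
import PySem

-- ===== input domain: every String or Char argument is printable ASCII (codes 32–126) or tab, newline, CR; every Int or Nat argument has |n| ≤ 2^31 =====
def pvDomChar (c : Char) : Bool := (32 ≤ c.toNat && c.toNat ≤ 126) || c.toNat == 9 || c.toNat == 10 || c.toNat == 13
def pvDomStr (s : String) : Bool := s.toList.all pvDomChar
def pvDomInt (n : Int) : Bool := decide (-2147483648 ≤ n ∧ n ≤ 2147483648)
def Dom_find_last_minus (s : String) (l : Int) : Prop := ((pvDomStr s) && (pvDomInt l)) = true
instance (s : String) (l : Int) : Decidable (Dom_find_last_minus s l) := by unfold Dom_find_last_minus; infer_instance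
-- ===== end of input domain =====

-- B builds the list of maximal dash runs up front and reads both answers off it,
-- instead of A's per-character state machine; same cost, different decomposition.

-- ===== PORT A =====
-- loop body of A's for-loop (n += 1; the if/elif chain; cur = c)
def A_step : Option Int × Option Int × Option Char × Int → Char →
    Option Int × Option Int × Option Char × Int
  | (i, j, cur, n), c =>
    if cur.isSome ∧ some c = cur then (i, j, some c, n + 1)
    else if c = '-' then (some (n + 1), j, some c, n + 1)
    else if cur = some '-' then (i, some (n + 1), some c, n + 1)
    else (i, j, some c, n + 1)

def find_last_minus (s : String) (l : Int) : Option Int × Option Int :=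
  let st := s.toList.foldl A_step (none, none, none, -1)
  let i := st.1
  let j := st.2.1
  let j := if i.isSome ∧ j = none then some l else j
  (i, j)

-- ===== PORT B =====
-- length of B's inner while-loop scan: number of leading dashes
def dashCount : List Char → Nat
  | [] => 0
  | c :: rest => if c = '-' then dashCount rest + 1 else 0

-- B's outer while-loop: maximal dash runs of cs, offsets starting at k
def runsOf : List Char → Int → List (Int × Int)
  | [], _ => []
  | c :: rest, k =>
    if c = '-' then
      let m := dashCount rest
      (k, k + 1 + (m : Int)) :: runsOf (rest.drop m) (k + 1 + (m : Int))
    else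
      runsOf rest (k + 1)
termination_by cs _ => cs.length
decreasing_by
  · simp only [List.length_cons, List.length_drop]; omega
  · simp

def find_last_minus_alt (s : String) (l : Int) : Option Int × Option Int :=
  let cs := s.toList
  let n : Int := cs.length
  let runs := runsOf cs 0
  match runs.getLast? with
  | none => (none, none)
  | some (i, e) =>
    let j : Int :=
      if e < n then e
      else
        match runs.dropLast.getLast? with
        | some (_, e2) => e2
        | none => l
    (some i, some j)

-- ===== PRECONDITION & SPEC =====
def Spec_find_last_minus (s : String) (l : Int) (out : Option Int × Option Int) : Prop := out = find_last_minus_alt s l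
instance (s : String) (l : Int) (out : Option Int × Option Int) : Decidable (Spec_find_last_minus s l out) := by unfold Spec_find_last_minus; infer_instance

-- ===== CLAIM (what is proved, stated in full; the proofs are below) =====
def Claim_equal_find_last_minus : Prop := ∀ (s : String) (l : Int), Dom_find_last_minus s l → Spec_find_last_minus s l (find_last_minus s l)

-- ===== LEMMAS AND PROOFS =====

lemma dashCount_le_length : ∀ cs : List Char, dashCount cs ≤ cs.length
  | [] => Nat.le_refl _
  | c :: rest => by
    simp only [dashCount, List.length_cons]
    split <;> [exact Nat.succ_le_succ (dashCount_le_length rest);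
               exact Nat.le_succ_of_le (Nat.zero_le _)]

-- i-component of the answer as a function of the run list
def iOf (runs : List (Int × Int)) (i0 : Option Int) : Option Int :=
  match runs.getLast? with
  | none => i0
  | some (a, _) => some a

-- j-component of the answer as a function of the run list
def jOf (runs : List (Int × Int)) (lim : Int) (j0 : Option Int) : Option Int :=
  match runs.getLast? with
  | none => j0
  | some (_, e) =>
    if e < lim then some e
    else
      match runs.dropLast.getLast? with
      | some (_, e2) => some e2
      | none => j0

lemma iOf_cons (a e : Int) (runs : List (Int × Int)) (i0 : Option Int) :
    iOf ((a, e) :: runs) i0 = iOf runs (some a) := by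
  cases runs with
  | nil => simp [iOf]
  | cons r rs =>
    simp only [iOf, List.getLast?_cons_cons]
    cases h : (r :: rs).getLast? with
    | none => simp at h
    | some p => obtain ⟨x, y⟩ := p; rfl

lemma jOf_cons (a e : Int) (runs : List (Int × Int)) (lim : Int) (j0 : Option Int)
    (he : e < lim) : jOf ((a, e) :: runs) lim j0 = jOf runs lim (some e) := by
  match runs with
  | [] => simp [jOf, he]
  | r :: rs =>
    simp only [jOf, List.getLast?_cons_cons,
      List.dropLast_cons_of_ne_nil (List.cons_ne_nil r rs)]
    cases hL : (r :: rs).getLast? with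
    | none => simp at hL
    | some p =>
      obtain ⟨x, y⟩ := p
      cases hD : (r :: rs).dropLast with
      | nil => simp only [List.getLast?_singleton, List.getLast?_nil]
      | cons q qs =>
        simp only [List.getLast?_cons_cons]
        cases hQ : (q :: qs).getLast? with
        | none => simp at hQ
        | some w => obtain ⟨u, v⟩ := w; rfl

lemma take_dashCount (cs : List Char) :
    cs.take (dashCount cs) = List.replicate (dashCount cs) '-' := by
  induction cs with
  | nil => simp [dashCount]
  | cons c rest ih =>
    by_cases hc : c = '-'
    · simp [dashCount, hc, List.replicate_succ, ih]
    · simp [dashCount, hc]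

lemma drop_dashCount_head (cs : List Char) :
    ∀ c rest, cs.drop (dashCount cs) = c :: rest → c ≠ '-' := by
  induction cs with
  | nil => intro c rest h; simp at h
  | cons x xs ih =>
    intro c rest h
    by_cases hx : x = '-'
    · simp [dashCount, hx] at h; exact ih c rest h
    · simp [dashCount, hx] at h; rw [← h.1]; exact hx

-- folding A's loop body over a block of dashes while the previous char is a dash: no-op
lemma dash_skip : ∀ (m : Nat) (i j : Option Int) (n : Int),
    (List.replicate m '-').foldl A_step (i, j, some '-', n) = (i, j, some '-', n + m) := by
  intro m
  induction m with
  | zero => intro i j n; simp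
  | succ m ih =>
    intro i j n
    rw [List.replicate_succ, List.foldl_cons]
    have : A_step (i, j, some '-', n) '-' = (i, j, some '-', n + 1) := by
      simp [A_step]
    rw [this, ih]
    congr 1; push_cast; ring_nf

-- the core invariant: A's fold from any state whose previous char is not '-'
-- computes iOf/jOf of B's run list of the remaining suffix
-- the core invariant: A's fold from any state whose previous char is not '-'
-- computes iOf/jOf of B's run list of the remaining suffix
lemma fold_char : ∀ (N : Nat) (cs : List Char), cs.length ≤ N →
    ∀ (k : Int) (i j : Option Int) (cur : Option Char), cur ≠ some '-' →
    (cs.foldl A_step (i, j, cur, k - 1)).1 = iOf (runsOf cs k) i ∧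
    (cs.foldl A_step (i, j, cur, k - 1)).2.1 = jOf (runsOf cs k) (k + cs.length) j := by
  intro N
  induction N with
  | zero =>
    intro cs hlen k i j cur hcur
    have : cs = [] := List.eq_nil_of_length_eq_zero (Nat.le_zero.mp hlen)
    subst this
    simp [runsOf, iOf, jOf]
  | succ N ih =>
    intro cs hlen k i j cur hcur
    match cs with
    | [] => simp [runsOf, iOf, jOf]
    | c :: rest =>
      by_cases hc : c = '-'
      · -- a dash block starts here
        subst hc
        set m := dashCount rest with hm
        have hsplit : rest = List.replicate m '-' ++ rest.drop m := by
          conv_lhs => rw [← List.take_append_drop m rest]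
          rw [hm, take_dashCount]
        have hstep1 : A_step (i, j, cur, k - 1) '-' = (some k, j, some '-', k) := by
          have h1 : ¬ (cur.isSome ∧ some '-' = cur) := by
            rintro ⟨_, h⟩; exact hcur h.symm
          have hk1 : k - 1 + 1 = k := by ring
          simp [A_step, h1, hk1]
        have hmlen : m ≤ rest.length := hm ▸ dashCount_le_length rest
        have hrun : runsOf ('-' :: rest) k =
            (k, k + 1 + (m : Int)) :: runsOf (rest.drop m) (k + 1 + (m : Int)) := by
          rw [runsOf]; simp [hm]
        have hF : List.foldl A_step (i, j, cur, k - 1) ('-' :: rest)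
            = List.foldl A_step (some k, j, some '-', k + (m : Int)) (rest.drop m) := by
          rw [List.foldl_cons, hstep1]
          conv_lhs => rw [hsplit]
          rw [List.foldl_append, dash_skip]
        cases hdrop : rest.drop m with
        | nil =>
          -- the run reaches the end of the string
          have hrlen : rest.length = m := by
            have h := List.length_drop (l := rest) (i := m)
            rw [hdrop] at h; simp at h; omega
          rw [hdrop] at hF hrun
          rw [hF, hrun]
          simp only [List.foldl_nil, runsOf]
          constructor
          · simp [iOf]
          · simp only [jOf, List.getLast?_singleton, List.getLast?_nil,
              List.dropLast_singleton]
            have hlt : ¬ (k + 1 + (m : Int) < k + (('-' :: rest).length : Int)) := by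
              have hL : ('-' :: rest).length = m + 1 := by simp [hrlen]
              rw [hL]; push_cast; omega
            rw [if_neg hlt]
        | cons c' rest3 =>
          -- the run is followed by the non-dash char c'
          have hc' : c' ≠ '-' := drop_dashCount_head rest c' rest3 (hm ▸ hdrop)
          rw [hdrop] at hF hrun
          rw [hF, hrun, List.foldl_cons]
          have hstep2 : A_step (some k, j, some '-', k + (m : Int)) c' =
              (some k, some (k + (m : Int) + 1), some c', k + (m : Int) + 1) := by
            have h1 : ¬ ((some '-' : Option Char).isSome ∧ some c' = some '-') := by
              rintro ⟨_, h⟩; exact hc' (by simpa using h)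
            simp [A_step, hc']
          rw [hstep2]
          have hd : rest.length = m + 1 + rest3.length := by
            have h := List.length_drop (l := rest) (i := m)
            rw [hdrop] at h; simp at h; omega
          have hlen3 : rest3.length ≤ N := by simp at hlen; omega
          have hk2 : k + (m : Int) + 1 = (k + (m : Int) + 2) - 1 := by ring
          rw [hk2]
          have H := ih rest3 hlen3 (k + (m : Int) + 2) (some k)
            (some ((k + (m : Int) + 2) - 1)) (some c') (by simpa using hc')
          have hrun2 : runsOf (c' :: rest3) (k + 1 + (m : Int)) =
              runsOf rest3 (k + 1 + (m : Int) + 1) := by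
            rw [runsOf]; simp [hc']
          have hoff : k + 1 + (m : Int) + 1 = k + (m : Int) + 2 := by ring
          constructor
          · rw [H.1, hrun2, hoff, iOf_cons]
          · rw [H.2, hrun2, hoff, jOf_cons]
            · have h1 : k + (m : Int) + 2 + (rest3.length : Int)
                  = k + (('-' :: rest).length : Int) := by
                have hL : ('-' :: rest).length = m + 1 + 1 + rest3.length := by
                  simp only [List.length_cons, hd]; omega
                rw [hL]; push_cast; ring
              have h2 : some ((k + (m : Int) + 2) - 1) = some (k + 1 + (m : Int)) := by
                congr 1; ring
              rw [h1, h2]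
            · have hL2 : (('-' :: rest).length : Int) = (m : Int) + 2 + (rest3.length : Int) := by
                simp only [List.length_cons, hd]; push_cast; ring
              rw [hL2]
              have h0 : (0 : Int) ≤ (rest3.length : Int) := Int.natCast_nonneg _
              omega

      · -- a single non-dash char: state advances, i and j untouched
        have hstep : A_step (i, j, cur, k - 1) c = (i, j, some c, (k + 1) - 1) := by
          have hk1 : k - 1 + 1 = (k + 1) - 1 := by ring
          by_cases h1 : cur.isSome ∧ some c = cur
          · simp only [A_step, if_pos h1, hk1]
          · have h2 : ¬ (cur = some '-') := fun hcc => hcur hcc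
            simp only [A_step, if_neg h1, if_neg hc, if_neg h2, hk1]
        rw [List.foldl_cons, hstep]
        have hlen' : rest.length ≤ N := by simp at hlen; omega
        have H := ih rest hlen' (k + 1) i j (some c) (by simpa using hc)
        have hrun : runsOf (c :: rest) k = runsOf rest (k + 1) := by
          rw [runsOf]; simp [hc]
        rw [H.1, H.2, hrun]
        constructor
        · rfl
        · congr 1
          simp only [List.length_cons]
          push_cast
          ring

-- ===== VERDICT (by name: the statement is the Claim_ definition above) =====
theorem find_last_minus_spec : Claim_equal_find_last_minus := by
  intro s l _
  unfold Spec_find_last_minus find_last_minus find_last_minus_alt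
  have h := fold_char (s.toList.length) s.toList (Nat.le_refl _) 0 none none none (by simp)
  rw [show ((none, none, none, -1) : Option Int × Option Int × Option Char × Int)
      = (none, none, none, 0 - 1) from by norm_num]
  dsimp only
  rw [h.1, h.2]
  simp only [zero_add]
  cases hL : (runsOf s.toList 0).getLast? with
  | none => simp [iOf, jOf, hL]
  | some p =>
    obtain ⟨a, e⟩ := p
    simp only [iOf, jOf, hL]
    by_cases he : e < ((s.toList.length : Nat) : Int)
    · simp only [String.length_toList] at he
      simp [he]
    · simp only [String.length_toList] at he
      cases (runsOf s.toList 0).dropLast.getLast? with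
      | none => simp [he]
      | some q => obtain ⟨b, e2⟩ := q; simp [he]
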